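-- pv_equiv track=rewrite | github.com/jie-meng/stock-analysis | .agents/skills/portfolio-analyzer/scripts/ocr_portfolio.py | _deduplicate_holdings
-- ===== SOURCE A (Python) =====
-- def _deduplicate_holdings(holdings: list[dict]) -> list[dict]:
--     """按名称去重（多张截图可能有重叠区域）。保留信息更完整的那条。"""
--     seen: dict[str, dict] = {}
--     for h in holdings:
--         name = h.get("name", "")
--         if name in seen:
--             existing = seen[name]
--             filled_existing = sum(1 for v in existing.values() if v and v != "-")
--             filled_new = sum(1 for v in h.values() if v and v != "-")
--             if filled_new > filled_existing:
--                 seen[name] = h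
--         else:
--             seen[name] = h
--     return list(seen.values())
-- ===== SOURCE B (Python) =====
-- def _deduplicate_holdings(holdings: list[dict]) -> list[dict]:
--     """Two-pass: group records by name, then pick the most-filled record of each group."""
--     def fill(h: dict) -> int:
--         return sum(1 for v in h.values() if v and v != "-")
--
--     groups: dict[str, list[dict]] = {}
--     for h in holdings:
--         groups.setdefault(h.get("name", ""), []).append(h)
--
--     result = []
--     for recs in groups.values():
--         best = recs[0]
--         for r in recs[1:]:
--             if fill(r) > fill(best):
--                 best = r
--         result.append(best)
--     return result
-- ===== Notes on version B (the rewrite author's own statement) =====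
-- stated objective: alternative
-- what changed: Replaces the single-pass dict of running bests by a two-pass decomposition: first group all records by name in first-appearance order, then reduce each group to its most-filled record (strict >, earliest wins ties).
import Mathlib
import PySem

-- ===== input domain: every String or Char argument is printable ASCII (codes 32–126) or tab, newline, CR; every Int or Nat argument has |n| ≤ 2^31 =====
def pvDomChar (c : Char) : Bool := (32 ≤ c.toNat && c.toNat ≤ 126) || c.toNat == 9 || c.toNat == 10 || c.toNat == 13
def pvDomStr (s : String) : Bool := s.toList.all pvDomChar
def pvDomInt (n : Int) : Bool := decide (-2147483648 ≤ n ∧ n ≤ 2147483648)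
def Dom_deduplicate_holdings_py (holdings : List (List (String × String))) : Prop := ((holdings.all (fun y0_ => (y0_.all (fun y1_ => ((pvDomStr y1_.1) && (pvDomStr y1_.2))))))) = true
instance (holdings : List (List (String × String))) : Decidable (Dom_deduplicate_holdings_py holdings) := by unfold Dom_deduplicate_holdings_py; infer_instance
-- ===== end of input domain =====

-- B replaces A's single-pass dict of running bests by a two-pass group-by-name-then-pick-best decomposition (alternative, not faster).


-- ===== PORT A =====
-- each Python record is a dict[str,str]; its List (String × String) argument is read through
-- PySem.Dict.ofList (duplicate keys: last value wins, first position), exactly as Python builds the dict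
def pvNorm (h : List (String × String)) : List (String × String) :=
  (PySem.Dict.ofList h).items

def pvName (h : List (String × String)) : String :=
  (PySem.Dict.ofList h).getD "name" ""

-- fill(h) = sum(1 for v in h.values() if v and v != "-")  (applied to a normalized record)
def pvFill (r : List (String × String)) : Nat :=
  (r.map Prod.snd).countP (fun v => !(v == "") && !(v == "-"))

def deduplicate_holdings_py (holdings : List (List (String × String))) : List (List (String × String)) :=
  (holdings.foldl
    (fun (seen : PySem.Dict String (List (String × String))) h =>
      let hd := pvNorm h
      let name := pvName h
      match seen.get? name with
      | some existing => if pvFill hd > pvFill existing then seen.insert name hd else seen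
      | none => seen.insert name hd)
    PySem.Dict.empty).values

-- ===== PORT B =====
def pvBest (b : List (String × String)) (recs : List (List (String × String))) : List (String × String) :=
  recs.foldl (fun best r => if pvFill r > pvFill best then r else best) b

-- best = recs[0]; for r in recs[1:]: …
def pvPick (recs : List (List (String × String))) : List (String × String) :=
  match recs with
  | [] => []
  | b :: rest => pvBest b rest

def deduplicate_holdings_py_alt (holdings : List (List (String × String))) : List (List (String × String)) :=
  let groups :=
    holdings.foldl
      (fun (g : PySem.Dict String (List (List (String × String)))) h =>
        g.modify (pvName h) [] (· ++ [pvNorm h]))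
      PySem.Dict.empty
  groups.values.map pvPick

-- ===== PRECONDITION & SPEC =====
def Spec_deduplicate_holdings_py (holdings : List (List (String × String))) (out : List (List (String × String))) : Prop := out = deduplicate_holdings_py_alt holdings
instance (holdings : List (List (String × String))) (out : List (List (String × String))) : Decidable (Spec_deduplicate_holdings_py holdings out) := by unfold Spec_deduplicate_holdings_py; infer_instance

-- ===== CLAIM (what is proved, stated in full; the proofs are below) =====
def Claim_equal_deduplicate_holdings_py : Prop := ∀ (holdings : List (List (String × String))), Dom_deduplicate_holdings_py holdings → Spec_deduplicate_holdings_py holdings (deduplicate_holdings_py holdings)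

-- ===== LEMMAS AND PROOFS =====

-- the per-record abstraction linking B's state to A's state
def pvF (p : String × List (List (String × String))) : String × List (String × String) :=
  (p.1, pvPick p.2)

theorem pvPick_append (l : List (List (String × String))) (hd : List (String × String)) (hl : l ≠ []) :
    pvPick (l ++ [hd]) = if pvFill hd > pvFill (pvPick l) then hd else pvPick l := by
  cases l with
  | nil => exact absurd rfl hl
  | cons b rest => simp [pvPick, pvBest, List.foldl_append]

theorem get?_mk_map (l : List (String × List (List (String × String)))) (k : String) :
    (PySem.Dict.mk (l.map pvF)).get? k = ((PySem.Dict.mk l).get? k).map pvPick := by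
  induction l with
  | nil => simp [PySem.Dict.get?]
  | cons p rest ih =>
    obtain ⟨pk, pv⟩ := p
    simp only [List.map_cons, pvF, PySem.Dict.get?_mk_cons]
    split_ifs <;> simp_all

theorem nodup_step (g : PySem.Dict String (List (List (String × String))))
    (hnd : g.keys.Nodup) (h : List (String × String)) :
    (g.modify (pvName h) [] (· ++ [pvNorm h])).keys.Nodup := by
  rw [show g.modify (pvName h) [] (· ++ [pvNorm h])
      = g.insert (pvName h) (g.getD (pvName h) [] ++ [pvNorm h]) from rfl]
  by_cases hc : g.contains (pvName h) = true
  · rwa [PySem.Dict.keys_insert_of_contains _ _ hc]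
  · have hcf : g.contains (pvName h) = false := by simpa using hc
    rw [PySem.Dict.keys_insert_of_not_contains _ _ hcf]
    refine List.Nodup.append hnd (List.nodup_singleton _) ?_
    intro a ha hb
    simp only [List.mem_singleton] at hb
    subst hb
    exact hc ((PySem.Dict.contains_iff_mem_keys g _).mpr ha)

theorem ne_step (g : PySem.Dict String (List (List (String × String))))
    (hne : ∀ p ∈ g.items, p.2 ≠ []) (h : List (String × String)) :
    ∀ p ∈ (g.modify (pvName h) [] (· ++ [pvNorm h])).items, p.2 ≠ [] := by
  intro p hp
  rw [show g.modify (pvName h) [] (· ++ [pvNorm h])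
      = g.insert (pvName h) (g.getD (pvName h) [] ++ [pvNorm h]) from rfl] at hp
  rcases (PySem.Dict.mem_items_insert _ _ _ p).mp hp with h1 | ⟨h2, _⟩
  · subst h1; simp
  · exact hne p h2

theorem step_eq (g : PySem.Dict String (List (List (String × String))))
    (hnd : g.keys.Nodup) (hne : ∀ p ∈ g.items, p.2 ≠ []) (h : List (String × String)) :
    (fun (seen : PySem.Dict String (List (String × String))) h =>
        let hd := pvNorm h
        let name := pvName h
        match seen.get? name with
        | some existing => if pvFill hd > pvFill existing then seen.insert name hd else seen
        | none => seen.insert name hd) (PySem.Dict.mk (g.items.map pvF)) h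
    = PySem.Dict.mk ((g.modify (pvName h) [] (· ++ [pvNorm h])).items.map pvF) := by
  dsimp only
  rw [show g.modify (pvName h) [] (· ++ [pvNorm h])
      = g.insert (pvName h) (g.getD (pvName h) [] ++ [pvNorm h]) from rfl]
  rw [get?_mk_map]
  by_cases hc : g.contains (pvName h) = true
  · obtain ⟨l, hg⟩ : ∃ l, g.get? (pvName h) = some l := by
      have hiso := PySem.Dict.contains_eq_isSome_get? g (pvName h)
      rw [hc] at hiso
      exact Option.isSome_iff_exists.mp hiso.symm
    have hl : l ≠ [] := hne (pvName h, l) (PySem.Dict.mem_items_of_get?_eq_some g hg)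
    have hgetD : g.getD (pvName h) [] = l := PySem.Dict.getD_of_get?_eq_some g [] hg
    rw [hg, hgetD]
    simp only [Option.map_some]
    have hpick := pvPick_append l (pvNorm h) hl
    by_cases hcmp : pvFill (pvNorm h) > pvFill (pvPick l)
    · rw [if_pos hcmp]
      apply PySem.Dict.ext
      have hcontains : (PySem.Dict.mk (g.items.map pvF)).contains (pvName h) = true := by
        rw [PySem.Dict.contains_eq_isSome_get?, get?_mk_map, hg]; rfl
      rw [PySem.Dict.items_insert_of_contains _ _ hcontains,
          PySem.Dict.items_insert_of_contains _ _ hc]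
      show (g.items.map pvF).map _ = (g.items.map _).map pvF
      rw [List.map_map, List.map_map]
      apply List.map_congr_left
      intro p _
      by_cases hpn : p.1 = pvName h
      · simp [Function.comp, pvF, hpn, hpick, if_pos hcmp]
      · simp [Function.comp, pvF, hpn]
    · rw [if_neg hcmp]
      apply PySem.Dict.ext
      rw [PySem.Dict.items_insert_of_contains _ _ hc]
      show (g.items.map pvF) = (g.items.map _).map pvF
      rw [List.map_map]
      apply List.map_congr_left
      intro p hp
      by_cases hpn : p.1 = pvName h
      · have hgp : g.get? p.1 = some p.2 := PySem.Dict.get?_of_mem_items g (by simpa using hp) hnd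
        rw [hpn, hg] at hgp
        have hp2 : p.2 = l := by injection hgp.symm
        simp [Function.comp, pvF, hpn, hp2, hpick, if_neg hcmp]
      · simp [Function.comp, pvF, hpn]
  · have hcf : g.contains (pvName h) = false := by simpa using hc
    have hg : g.get? (pvName h) = none := by
      have hiso := PySem.Dict.contains_eq_isSome_get? g (pvName h)
      rw [hcf] at hiso
      exact Option.not_isSome_iff_eq_none.mp (by simp [← hiso])
    rw [hg]
    simp only [Option.map_none]
    apply PySem.Dict.ext
    have hcontains : (PySem.Dict.mk (g.items.map pvF)).contains (pvName h) = false := by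
      rw [PySem.Dict.contains_eq_isSome_get?, get?_mk_map, hg]; rfl
    rw [PySem.Dict.items_insert_of_not_contains _ _ hcontains,
        PySem.Dict.getD_of_not_contains g [] hcf,
        PySem.Dict.items_insert_of_not_contains _ _ hcf]
    simp [pvF, pvPick, pvBest]

theorem loop_eq (hs : List (List (String × String)))
    (g : PySem.Dict String (List (List (String × String))))
    (hnd : g.keys.Nodup) (hne : ∀ p ∈ g.items, p.2 ≠ []) :
    hs.foldl
      (fun (seen : PySem.Dict String (List (String × String))) h =>
        let hd := pvNorm h
        let name := pvName h
        match seen.get? name with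
        | some existing => if pvFill hd > pvFill existing then seen.insert name hd else seen
        | none => seen.insert name hd)
      (PySem.Dict.mk (g.items.map pvF)) =
    PySem.Dict.mk
      ((hs.foldl
          (fun (g : PySem.Dict String (List (List (String × String)))) h =>
            g.modify (pvName h) [] (· ++ [pvNorm h]))
          g).items.map pvF) := by
  induction hs generalizing g with
  | nil => rfl
  | cons h rest ih =>
    rw [List.foldl_cons, List.foldl_cons]
    refine Eq.trans (congrArg (fun s => List.foldl _ s rest) (step_eq g hnd hne h))
      (ih _ (nodup_step g hnd h) (ne_step g hne h))

theorem deduplicate_holdings_py_spec : Claim_equal_deduplicate_holdings_py := by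
  intro holdings _
  unfold Spec_deduplicate_holdings_py deduplicate_holdings_py deduplicate_holdings_py_alt
  have hmain := loop_eq holdings PySem.Dict.empty PySem.Dict.nodup_keys_empty
    (by intro p hp; cases hp)
  rw [show (PySem.Dict.mk
        (((PySem.Dict.empty : PySem.Dict String (List (List (String × String)))).items).map pvF))
      = (PySem.Dict.empty : PySem.Dict String (List (String × String))) from rfl] at hmain
  rw [hmain]
  simp [PySem.Dict.values, List.map_map, pvF, Function.comp]
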